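-- pv_equiv track=rewrite | github.com/Haj1h0/programmers_solutions_python | level_1/햄버거 만들기.py | solution
-- ===== SOURCE A (Python) =====
-- def solution(ingredient):
--     h, result = [], 0
--     for i in ingredient:
--         h.append(i)
--         if len(h) >= 4 and i == 1:
--             if h[-2] == 3 and h[-3] == 2 and h[-4] == 1:     # len() -> O(1)
--                 del h[-4:]
--                 result += 1
--     return result
-- ===== SOURCE B (Python) =====
-- def solution(ingredient):
--     # KMP-style matcher for the pattern 1,2,3,1: keep a stack of automaton
--     # states (match progress per stacked element) instead of re-inspecting
--     # the top ingredients after every push.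
--     states = []
--     count = 0
--     for x in ingredient:
--         top = states[-1] if states else 0
--         if x == 1:
--             if top == 3:
--                 del states[-3:]
--                 count += 1
--             else:
--                 states.append(1)
--         elif x == 2 and top == 1:
--             states.append(2)
--         elif x == 3 and top == 2:
--             states.append(3)
--         else:
--             states.append(0)
--     return count
-- ===== Notes on version B (the rewrite author's own statement) =====
-- stated objective: alternative
-- what changed: B replaces A's push-then-reinspect ingredient stack (checking h[-2],h[-3],h[-4] after each push) with a KMP-style automaton: it keeps a stack of match-progress states for the pattern 1,2,3,1 and never looks back at the ingredients themselves.
import Mathlib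
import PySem

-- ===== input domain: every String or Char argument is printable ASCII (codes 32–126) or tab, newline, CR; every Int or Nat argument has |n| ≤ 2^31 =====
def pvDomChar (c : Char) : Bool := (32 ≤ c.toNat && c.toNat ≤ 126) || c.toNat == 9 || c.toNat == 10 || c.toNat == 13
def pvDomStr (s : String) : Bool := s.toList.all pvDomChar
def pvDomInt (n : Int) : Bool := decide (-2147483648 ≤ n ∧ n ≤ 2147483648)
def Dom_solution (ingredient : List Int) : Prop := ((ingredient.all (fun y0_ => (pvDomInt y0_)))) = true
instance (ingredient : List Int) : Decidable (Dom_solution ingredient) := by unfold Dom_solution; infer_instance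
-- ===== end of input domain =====

-- B replaces A's push-then-reinspect ingredient stack with a KMP-style automaton that
-- keeps a stack of match-progress states for the pattern 1,2,3,1 (alternative, same O(n)).


-- ===== PORT A =====
-- loop body of A: push i, then compare the top four ingredients with 1,2,3,1
def solutionStep (s : List Int × Int) (i : Int) : List Int × Int :=
  let h := s.1 ++ [i]
  if h.length ≥ 4 ∧ i = 1 then
    if PySem.List.pyGet? h (-2) = some 3 ∧ PySem.List.pyGet? h (-3) = some 2 ∧
       PySem.List.pyGet? h (-4) = some 1 then
      (PySem.List.slice h none (some (-4)), s.2 + 1)   -- del h[-4:]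
    else (h, s.2)
  else (h, s.2)

def solution (ingredient : List Int) : Int :=
  (ingredient.foldl solutionStep ([], 0)).2

-- ===== PORT B =====
-- loop body of B: automaton transition on the stack of match-progress states
def solutionAltStep (s : List Int × Int) (x : Int) : List Int × Int :=
  let states := s.1
  let top : Int := if states ≠ [] then (PySem.List.pyGet? states (-1)).getD 0 else 0
  if x = 1 then
    if top = 3 then (PySem.List.slice states none (some (-3)), s.2 + 1)   -- del states[-3:]
    else (states ++ [1], s.2)
  else if x = 2 ∧ top = 1 then (states ++ [2], s.2)
  else if x = 3 ∧ top = 2 then (states ++ [3], s.2)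
  else (states ++ [0], s.2)

def solution_alt (ingredient : List Int) : Int :=
  (ingredient.foldl solutionAltStep ([], 0)).2

-- ===== PRECONDITION & SPEC =====
def Spec_solution (ingredient : List Int) (out : Int) : Prop := out = solution_alt ingredient
instance (ingredient : List Int) (out : Int) : Decidable (Spec_solution ingredient out) := by unfold Spec_solution; infer_instance

-- ===== CLAIM (what is proved, stated in full; the proofs are below) =====
def Claim_equal_solution : Prop := ∀ (ingredient : List Int), Dom_solution ingredient → Spec_solution ingredient (solution ingredient)

-- ===== LEMMAS AND PROOFS =====

-- cons-level (head = top of stack) reformulations of the two loop bodies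
def pvTop (l : List Int) : Int := l.head?.getD 0

def stepA' (s : List Int × Int) (i : Int) : List Int × Int :=
  if s.1.take 3 = [3, 2, 1] ∧ i = 1 then (s.1.drop 3, s.2 + 1) else (i :: s.1, s.2)

def stepB' (s : List Int × Int) (x : Int) : List Int × Int :=
  let top := pvTop s.1
  if x = 1 then
    if top = 3 then (s.1.drop 3, s.2 + 1) else (1 :: s.1, s.2)
  else if x = 2 ∧ top = 1 then (2 :: s.1, s.2)
  else if x = 3 ∧ top = 2 then (3 :: s.1, s.2)
  else (0 :: s.1, s.2)

-- automaton transition and the state list of a stack (head = top)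
def pvStep (s x : Int) : Int :=
  if x = 1 then (if s = 3 then 4 else 1)
  else if x = 2 ∧ s = 1 then 2
  else if x = 3 ∧ s = 2 then 3
  else 0

def pvF : List Int → List Int
  | [] => []
  | x :: h => pvStep (pvTop (pvF h)) x :: pvF h

lemma pvTop_nil : pvTop ([] : List Int) = 0 := rfl

lemma pvTop_cons (a : Int) (l : List Int) : pvTop (a :: l) = a := rfl

lemma pv_take_rev (l : List Int) (k : Nat) :
    l.reverse.take (l.length - k) = (l.drop k).reverse := by
  rcases Nat.le_total k l.length with hk | hk
  · rw [List.take_reverse]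
    congr 1
    congr 1
    omega
  · rw [List.drop_eq_nil_of_le (by omega)]
    simp [Nat.sub_eq_zero_of_le hk]

lemma pv_pyGet_neg_append (pre l : List Int) (k : Nat) (h0 : 0 < k) (hk : k ≤ l.length) :
    PySem.List.pyGet? (pre ++ l) (-(k : Int)) = l[l.length - k]? := by
  rw [PySem.List.pyGet?_neg_natCast _ _ h0 (by simp; omega)]
  rw [List.getElem?_append_right (by simp; omega)]
  congr 1
  simp
  omega

lemma bridgeA (h : List Int) (r i : Int) :
    solutionStep (h.reverse, r) i = ((stepA' (h, r) i).1.reverse, (stepA' (h, r) i).2) := by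
  rcases h with _ | ⟨a, _ | ⟨b, _ | ⟨c, rest⟩⟩⟩
  · simp [solutionStep, stepA']
  · simp [solutionStep, stepA']
  · simp [solutionStep, stepA']
  · have hr : (a :: b :: c :: rest).reverse ++ [i] = rest.reverse ++ [c, b, a, i] := by
      simp
    have h2 := pv_pyGet_neg_append rest.reverse [c, b, a, i] 2 (by omega) (by simp)
    have h3 := pv_pyGet_neg_append rest.reverse [c, b, a, i] 3 (by omega) (by simp)
    have h4 := pv_pyGet_neg_append rest.reverse [c, b, a, i] 4 (by omega) (by simp)
    norm_num at h2 h3 h4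
    have hlen : (rest.reverse ++ [c, b, a, i]).length ≥ 4 := by simp
    have hsl : PySem.List.slice (rest.reverse ++ [c, b, a, i]) none (some (-4)) =
        rest.reverse := by
      rw [PySem.List.slice_to_neg_ofNat _ 4 (by omega)]
      have hl : (rest.reverse ++ [c, b, a, i]).length - 4 = rest.reverse.length := by simp
      rw [hl, List.take_left]
    simp only [solutionStep, stepA', hr, h2, h3, h4, hsl, hlen]
    by_cases hi : i = 1 <;> by_cases ha : a = 3 <;> by_cases hb : b = 2 <;>
      by_cases hc : c = 1 <;> simp_all

lemma bridgeB (t : List Int) (r x : Int) :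
    solutionAltStep (t.reverse, r) x = ((stepB' (t, r) x).1.reverse, (stepB' (t, r) x).2) := by
  have htop : (if t.reverse ≠ [] then (PySem.List.pyGet? t.reverse (-1)).getD 0 else 0)
      = pvTop t := by
    rcases t with _ | ⟨a, ts⟩
    · simp [pvTop_nil]
    · rw [if_pos (by simp)]
      rw [PySem.List.pyGet?_neg_one, List.getLast?_reverse]
      rfl
  have hsl : PySem.List.slice t.reverse none (some (-3)) = (t.drop 3).reverse := by
    rw [PySem.List.slice_to_neg_ofNat _ 3 (by omega), List.length_reverse, pv_take_rev]
  simp only [solutionAltStep, stepB', htop, hsl]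
  split_ifs <;> simp

lemma foldA_bridge (ing : List Int) : ∀ (h : List Int) (r : Int),
    List.foldl solutionStep (h.reverse, r) ing =
      ((List.foldl stepA' (h, r) ing).1.reverse, (List.foldl stepA' (h, r) ing).2) := by
  induction ing with
  | nil => intro h r; rfl
  | cons i ing ih =>
    intro h r
    simp only [List.foldl_cons, bridgeA]
    have := ih (stepA' (h, r) i).1 (stepA' (h, r) i).2
    simpa using this

lemma foldB_bridge (ing : List Int) : ∀ (t : List Int) (r : Int),
    List.foldl solutionAltStep (t.reverse, r) ing =
      ((List.foldl stepB' (t, r) ing).1.reverse, (List.foldl stepB' (t, r) ing).2) := by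
  induction ing with
  | nil => intro t r; rfl
  | cons x ing ih =>
    intro t r
    simp only [List.foldl_cons, bridgeB]
    have := ih (stepB' (t, r) x).1 (stepB' (t, r) x).2
    simpa using this

lemma pv_st1 (h : List Int) (hh : pvTop (pvF h) = 1) : ∃ r, h = 1 :: r := by
  rcases h with _ | ⟨x, hs⟩
  · simp [pvF, pvTop_nil] at hh
  · refine ⟨hs, ?_⟩
    simp only [pvF, pvTop_cons, pvStep] at hh
    split_ifs at hh with h1 h2 h3 h4 <;> first | (rw [h1]) | omega

lemma pv_st2 (h : List Int) (hh : pvTop (pvF h) = 2) : ∃ r, h = 2 :: 1 :: r := by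
  rcases h with _ | ⟨x, hs⟩
  · simp [pvF, pvTop_nil] at hh
  · simp only [pvF, pvTop_cons, pvStep] at hh
    split_ifs at hh with h1 h2 h3 h4 <;> try omega
    obtain ⟨hx, hs1⟩ := h3
    obtain ⟨r, hr⟩ := pv_st1 hs hs1
    exact ⟨r, by rw [hx, hr]⟩

lemma pv_st3 (h : List Int) (hh : pvTop (pvF h) = 3) : ∃ r, h = 3 :: 2 :: 1 :: r := by
  rcases h with _ | ⟨x, hs⟩
  · simp [pvF, pvTop_nil] at hh
  · simp only [pvF, pvTop_cons, pvStep] at hh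
    split_ifs at hh with h1 h2 h3 h4 <;> try omega
    obtain ⟨hx, hs2⟩ := h4
    obtain ⟨r, hr⟩ := pv_st2 hs hs2
    exact ⟨r, by rw [hx, hr]⟩

lemma pv_cond_iff (h : List Int) (h4 : (4 : Int) ∉ pvF h) :
    pvTop (pvF h) = 3 ↔ h.take 3 = [3, 2, 1] := by
  constructor
  · intro hh
    obtain ⟨r, hr⟩ := pv_st3 h hh
    rw [hr]; rfl
  · intro ht
    have hd : h = 3 :: 2 :: 1 :: h.drop 3 := by
      conv_lhs => rw [← List.take_append_drop 3 h]
      rw [ht]; rfl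
    rw [hd] at h4 ⊢
    have hrfl : pvF (3 :: 2 :: 1 :: h.drop 3) =
        pvStep (pvStep (pvStep (pvTop (pvF (h.drop 3))) 1) 2) 3 ::
          pvStep (pvStep (pvTop (pvF (h.drop 3))) 1) 2 ::
            pvStep (pvTop (pvF (h.drop 3))) 1 :: pvF (h.drop 3) := by
      simp [pvF, pvTop_cons]
    have hmem : pvStep (pvTop (pvF (h.drop 3))) 1 ∈ pvF (3 :: 2 :: 1 :: h.drop 3) := by
      rw [hrfl]; simp
    have hne : pvStep (pvTop (pvF (h.drop 3))) 1 ≠ 4 := fun he => h4 (he ▸ hmem)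
    have h1 : pvStep (pvTop (pvF (h.drop 3))) 1 = 1 := by
      by_cases hs : pvTop (pvF (h.drop 3)) = 3
      · exact absurd (by simp [pvStep, hs]) hne
      · simp [pvStep, hs]
    rw [hrfl, pvTop_cons, h1]
    norm_num [pvStep]

lemma pv_step_ne4 (s x : Int) (h : ¬(x = 1 ∧ s = 3)) : pvStep s x ≠ 4 := by
  unfold pvStep
  split_ifs with h1 h2 <;> omega

lemma pv_main (ing : List Int) : ∀ (h t : List Int) (r : Int),
    t = pvF h → (4 : Int) ∉ t →
    (List.foldl stepA' (h, r) ing).2 = (List.foldl stepB' (t, r) ing).2 := by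
  induction ing with
  | nil => intro h t r _ _; rfl
  | cons x ing ih =>
    intro h t r ht h4
    simp only [List.foldl_cons]
    have hiff : pvTop t = 3 ↔ h.take 3 = [3, 2, 1] := by
      rw [ht]; exact pv_cond_iff h (ht ▸ h4)
    by_cases hc : h.take 3 = [3, 2, 1] ∧ x = 1
    · obtain ⟨hc1, hc2⟩ := hc
      have htop : pvTop t = 3 := hiff.mpr hc1
      have hA : stepA' (h, r) x = (h.drop 3, r + 1) := by
        simp [stepA', hc1, hc2]
      have hB : stepB' (t, r) x = (t.drop 3, r + 1) := by
        simp [stepB', hc2, htop]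
      rw [hA, hB]
      have hd : h = 3 :: 2 :: 1 :: h.drop 3 := by
        conv_lhs => rw [← List.take_append_drop 3 h]
        rw [hc1]; rfl
      have hFd : t.drop 3 = pvF (h.drop 3) := by
        rw [ht]
        conv_lhs => rw [hd]
        rfl
      refine ih (h.drop 3) (t.drop 3) (r + 1) hFd (fun hm => h4 ?_)
      exact List.mem_of_mem_drop hm
    · have hnc : ¬(x = 1 ∧ pvTop t = 3) := by
        intro hp
        exact hc ⟨hiff.mp hp.2, hp.1⟩
      have hA : stepA' (h, r) x = (x :: h, r) := by
        simp only [stepA']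
        rw [if_neg (by tauto)]
      have hB : stepB' (t, r) x = (pvStep (pvTop t) x :: t, r) := by
        simp only [stepB', pvStep]
        split_ifs <;> simp_all
      rw [hA, hB]
      have hF : pvStep (pvTop t) x :: t = pvF (x :: h) := by
        rw [ht]; rfl
      refine ih (x :: h) _ r hF ?_
      intro hm
      rcases List.mem_cons.mp hm with hm | hm
      · exact pv_step_ne4 (pvTop t) x hnc hm.symm
      · exact h4 hm

-- ===== VERDICT (by name: the statement is the Claim_ definition above) =====
theorem solution_spec : Claim_equal_solution := by
  intro ingredient _
  unfold Spec_solution solution solution_alt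
  have hA := foldA_bridge ingredient [] 0
  have hB := foldB_bridge ingredient [] 0
  simp only [List.reverse_nil] at hA hB
  rw [hA, hB]
  exact pv_main ingredient [] [] 0 rfl (by simp)
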